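-- pv_equiv track=rewrite | github.com/mattdepillis/python-dsa | python-basics/strings.py | reorder_by_ascii
-- ===== SOURCE A (Python) =====
-- def reorder_by_ascii(string):
--   ascii_list = []
--
--   for char in string:
--     ascii_list.append((char, ord(char)))
--
--   sorted_list = sorted(ascii_list, key=lambda code: code[1])
--
--   reordered_string = ''
--
--   for pair in sorted_list:
--     reordered_string += pair[0]
--
--   return "\"{}\"".format(reordered_string)
-- ===== SOURCE B (Python) =====
-- def reorder_by_ascii(string):
--   counts = {}
--   for char in string:
--     counts[char] = counts.get(char, 0) + 1
--   pieces = []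
--   for char in sorted(counts):
--     pieces.append(char * counts[char])
--   return "\"{}\"".format(''.join(pieces))
-- ===== Notes on version B (the rewrite author's own statement) =====
-- stated objective: faster
-- what changed: B replaces the build-pairs-then-comparison-sort-then-concatenate pipeline by a counting sort: one pass builds a per-character frequency dict, then the sorted distinct characters are expanded by their counts.
import Mathlib
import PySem

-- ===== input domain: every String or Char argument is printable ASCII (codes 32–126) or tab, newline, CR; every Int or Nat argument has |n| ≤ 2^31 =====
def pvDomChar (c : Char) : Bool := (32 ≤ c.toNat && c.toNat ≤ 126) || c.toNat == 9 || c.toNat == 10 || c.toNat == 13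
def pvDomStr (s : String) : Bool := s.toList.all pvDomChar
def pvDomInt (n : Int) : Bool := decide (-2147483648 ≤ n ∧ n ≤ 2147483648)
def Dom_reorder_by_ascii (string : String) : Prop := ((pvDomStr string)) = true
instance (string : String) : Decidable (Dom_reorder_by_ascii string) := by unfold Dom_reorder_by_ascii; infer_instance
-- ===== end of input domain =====

-- B replaces A's build-pairs / comparison-sort / concatenate pipeline by a counting sort
-- (frequency dict, then expansion of the sorted distinct characters); return values agree everywhere.

-- ===== PORT A =====
def reorder_by_ascii (string : String) : String :=
  let ascii_list : List (Char × Int) :=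
    string.toList.foldl (fun acc char => acc ++ [(char, (char.toNat : Int))]) []
  let sorted_list := PySem.List.sorted ascii_list (fun code => code.2) false
  let reordered_string : List Char :=
    sorted_list.foldl (fun acc pair => acc ++ [pair.1]) []
  String.ofList ('"' :: reordered_string ++ ['"'])

-- ===== PORT B =====
def reorder_by_ascii_alt (string : String) : String :=
  let counts : PySem.Dict Char Int :=
    string.toList.foldl (fun d char => d.insert char (d.getD char 0 + 1)) PySem.Dict.empty
  let pieces : List (List Char) :=
    (PySem.List.sorted counts.keys (fun c => c) false).foldl
      (fun acc char => acc ++ [List.replicate (counts.getD char 0).toNat char]) []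
  String.ofList ('"' :: pieces.flatten ++ ['"'])

-- ===== PRECONDITION & SPEC =====
def Spec_reorder_by_ascii (string : String) (out : String) : Prop := out = reorder_by_ascii_alt string
instance (string : String) (out : String) : Decidable (Spec_reorder_by_ascii string out) := by unfold Spec_reorder_by_ascii; infer_instance

-- ===== CLAIM (what is proved, stated in full; the proofs are below) =====
def Claim_equal_reorder_by_ascii : Prop := ∀ (string : String), Dom_reorder_by_ascii string → Spec_reorder_by_ascii string (reorder_by_ascii string)

-- ===== LEMMAS AND PROOFS =====

theorem charKey_injective : Function.Injective (fun c : Char => (c.toNat : Int)) := by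
  intro a b h
  simp only [Int.natCast_inj] at h
  exact Char.ext (UInt32.toNat_inj.mp h)

theorem count_flatMap_replicate (K : List Char) (hK : K.Nodup) (f : Char → Nat) (a : Char) :
    (K.flatMap fun c => List.replicate (f c) c).count a = if a ∈ K then f a else 0 := by
  induction K with
  | nil => simp
  | cons c K ih =>
    rcases List.nodup_cons.mp hK with ⟨hc, hK'⟩
    simp only [List.flatMap_cons, List.count_append, List.count_replicate, ih hK',
      List.mem_cons]
    by_cases hac : a = c
    · subst hac; simp [hc]
    · have hca : ¬ c = a := fun h => hac h.symm
      simp [hac, hca]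

theorem pairwise_flatMap_replicate (K : List Char) (f : Char → Nat)
    (R : Char → Char → Prop) (hrefl : ∀ c, R c c) (h : K.Pairwise R) :
    (K.flatMap fun c => List.replicate (f c) c).Pairwise R := by
  induction K with
  | nil => simp
  | cons c K ih =>
    rcases List.pairwise_cons.mp h with ⟨hc, hK⟩
    simp only [List.flatMap_cons]
    refine List.pairwise_append.mpr ⟨?_, ih hK, ?_⟩
    · exact List.pairwise_replicate.mpr (Or.inr (hrefl c))
    · intro x hx y hy
      obtain rfl := List.eq_of_mem_replicate hx
      obtain ⟨k, hk, hyk⟩ := List.mem_flatMap.mp hy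
      obtain rfl := List.eq_of_mem_replicate hyk
      exact hc _ hk

-- the two ports produce the same character list between the quotes
theorem chars_eq (L : List Char) :
    ((PySem.List.sorted (L.map (fun c => (c, (c.toNat : Int)))) (fun code => code.2) false).map
        (fun p => p.1)) =
      (PySem.List.sorted (PySem.Set.ofList L) (fun c => c) false).flatMap
        (fun c => List.replicate (L.count c) c) := by
  set key := fun c : Char => (c.toNat : Int) with hkey
  set K := PySem.List.sorted (PySem.Set.ofList L) (fun c => c) false with hK
  have hKperm : K.Perm (PySem.Set.ofList L) := PySem.List.sorted_perm _ _ _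
  have hKnodup : K.Nodup := hKperm.nodup_iff.mpr (PySem.Set.nodup_ofList L)
  have hKmem : ∀ a : Char, a ∈ K ↔ a ∈ L := by
    intro a
    rw [PySem.List.mem_sorted, PySem.Set.mem_ofList]
  apply PySem.List.eq_of_perm_of_pairwise_le_of_injective key charKey_injective
  · -- permutation: both sides are permutations of L
    have h1 : ((PySem.List.sorted (L.map (fun c => (c, (c.toNat : Int)))) (fun code => code.2)
        false).map (fun p => p.1)).Perm L := by
      have := (PySem.List.sorted_perm (L.map (fun c => (c, (c.toNat : Int))))
        (fun code => code.2) false).map (fun p => p.1)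
      simpa [Function.comp_def] using this
    have h2 : (K.flatMap (fun c => List.replicate (L.count c) c)).Perm L := by
      rw [List.perm_iff_count]
      intro a
      rw [count_flatMap_replicate K hKnodup (fun c => L.count c) a]
      by_cases ha : a ∈ L
      · simp [(hKmem a).mpr ha]
      · simp [List.count_eq_zero.mpr ha, hKmem a]
    exact h1.trans h2.symm
  · -- left side is sorted by the key
    have hp : (PySem.List.sorted (L.map (fun c => (c, (c.toNat : Int)))) (fun code => code.2)
        false).Pairwise (fun p q => p.2 ≤ q.2) :=
      PySem.List.sorted_pairwise _ _
    rw [List.pairwise_map]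
    refine hp.imp_of_mem ?_
    intro p q hpm hqm hle
    have hpL := (PySem.List.mem_sorted _ _ _ _).mp hpm
    have hqL := (PySem.List.mem_sorted _ _ _ _).mp hqm
    obtain ⟨cp, _, rfl⟩ := List.mem_map.mp hpL
    obtain ⟨cq, _, rfl⟩ := List.mem_map.mp hqL
    exact hle
  · -- right side is sorted by the key
    have hKpw : K.Pairwise (fun a b => key a ≤ key b) := by
      have := PySem.List.sorted_pairwise (key := fun c : Char => c)
        (xs := PySem.Set.ofList L)
      refine this.imp ?_
      intro a b hab
      simp only [hkey, Char.toNat]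
      exact_mod_cast UInt32.le_iff_toNat_le.mp hab
    exact pairwise_flatMap_replicate K (fun c => L.count c) _ (fun c => le_refl _) hKpw

-- ===== VERDICT (by name: the statement is the Claim_ definition above) =====
theorem reorder_by_ascii_spec : Claim_equal_reorder_by_ascii := by
  intro string _
  unfold Spec_reorder_by_ascii reorder_by_ascii reorder_by_ascii_alt
  simp only [PySem.List.foldl_append_singleton_eq_map, List.nil_append,
    PySem.Dict.foldl_insert_getD_add_one_eq_counter, PySem.Dict.keys_counter]
  simp only [PySem.Dict.getD_counter, Int.toNat_natCast]
  have h := chars_eq string.toList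
  simp only [List.flatMap_def] at h
  rw [h]
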